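-- pv_equiv track=rewrite | github.com/ugurrates/CABTA | src/utils/dga_detector.py | _extract_sld
-- ===== SOURCE A (Python) =====
-- def _extract_sld(domain: str) -> str:
--     """Extract second-level domain label (strip TLD and subdomains).
--
--     Example: 'evil.sub.example.co.uk' -> 'example'
--              'xyzabc123.com' -> 'xyzabc123'
--     """
--     domain = domain.lower().strip().rstrip('.')
--
--     # Remove known multi-part TLDs first
--     multi_tlds = ['.co.uk', '.co.jp', '.com.br', '.com.au', '.org.uk', '.co.in']
--     for mt in multi_tlds:
--         if domain.endswith(mt):
--             domain = domain[:-len(mt)]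
--             parts = domain.split('.')
--             return parts[-1] if parts else domain
--
--     parts = domain.split('.')
--     if len(parts) >= 2:
--         return parts[-2]  # second-level domain
--     return parts[0]
-- ===== SOURCE B (Python) =====
-- _MULTI_TLDS = {'co.uk', 'co.jp', 'com.br', 'com.au', 'org.uk', 'co.in'}
--
--
-- def _extract_sld(domain: str) -> str:
--     domain = domain.lower().strip().rstrip('.')
--     parts = domain.split('.')
--     if len(parts) >= 3 and '.'.join(parts[-2:]) in _MULTI_TLDS:
--         return parts[-3]
--     if len(parts) >= 2:
--         return parts[-2]
--     return parts[0]
-- ===== Notes on version B (the rewrite author's own statement) =====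
-- stated objective: simpler
-- what changed: B splits the normalized domain into labels once and picks the label by index (parts[-3] if the last two labels form a known multi-part TLD, else parts[-2]/parts[0]), replacing A's loop of endswith tests each followed by a slice and a re-split.
import Mathlib
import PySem

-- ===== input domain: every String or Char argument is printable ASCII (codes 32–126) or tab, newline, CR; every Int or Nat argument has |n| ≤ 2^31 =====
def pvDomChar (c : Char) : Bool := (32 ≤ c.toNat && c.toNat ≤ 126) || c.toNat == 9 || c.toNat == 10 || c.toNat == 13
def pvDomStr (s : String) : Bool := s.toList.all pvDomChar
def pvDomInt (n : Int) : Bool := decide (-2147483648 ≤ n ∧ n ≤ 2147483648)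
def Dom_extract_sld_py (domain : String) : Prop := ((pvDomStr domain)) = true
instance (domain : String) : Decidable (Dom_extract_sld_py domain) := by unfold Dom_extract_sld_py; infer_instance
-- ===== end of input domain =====

-- B replaces A's endswith/slice/re-split loop over multi-part TLD suffixes by one split of the
-- domain plus an index-based choice of the label (objective: simpler decomposition; no speed claim).


-- ===== PORT A =====
-- exact port of str.rstrip('.'): drop trailing '.' characters (used by both Pythons' identical first line)
def pyRstripDot (cs : List Char) : List Char := (cs.reverse.dropWhile (· == '.')).reverse

-- the 'for mt in multi_tlds' loop of A: first matching suffix returns, else falls through (none)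
def extract_sld_py_loop (mts : List (List Char)) (d : List Char) : Option (List Char) :=
  match mts with
  | [] => none
  | mt :: rest =>
    if PySem.Chars.endswith d mt then
      let d' := PySem.Chars.slice d none (some (-(mt.length : Int)))   -- domain[:-len(mt)]
      let parts := PySem.Chars.splitOn d' ['.']
      some ((PySem.List.pyGet? parts (-1)).getD d')                    -- parts[-1] if parts else domain
    else extract_sld_py_loop rest d

def extract_sld_py (domain : String) : String :=
  let d := pyRstripDot (PySem.Chars.strip (PySem.Chars.lower domain.toList))
  String.ofList <|
    match extract_sld_py_loop
        [".co.uk".toList, ".co.jp".toList, ".com.br".toList,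
         ".com.au".toList, ".org.uk".toList, ".co.in".toList] d with
    | some r => r
    | none =>
      let parts := PySem.Chars.splitOn d ['.']
      if 2 ≤ parts.length then (PySem.List.pyGet? parts (-2)).getD []  -- parts[-2]
      else (PySem.List.pyGet? parts 0).getD []                         -- parts[0] (parts is never empty)

-- ===== PORT B =====
def extract_sld_py_alt (domain : String) : String :=
  let d := pyRstripDot (PySem.Chars.strip (PySem.Chars.lower domain.toList))
  let parts := PySem.Chars.splitOn d ['.']
  String.ofList <|
    if 3 ≤ parts.length ∧
        PySem.Chars.join ['.'] (PySem.List.slice parts (some (-2)) none) ∈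
          PySem.Set.ofList ["co.uk".toList, "co.jp".toList, "com.br".toList,
                            "com.au".toList, "org.uk".toList, "co.in".toList] then
      (PySem.List.pyGet? parts (-3)).getD []                           -- parts[-3]
    else if 2 ≤ parts.length then (PySem.List.pyGet? parts (-2)).getD []
    else (PySem.List.pyGet? parts 0).getD []

-- ===== PRECONDITION & SPEC =====
def Spec_extract_sld_py (domain : String) (out : String) : Prop := out = extract_sld_py_alt domain
instance (domain : String) (out : String) : Decidable (Spec_extract_sld_py domain out) := by unfold Spec_extract_sld_py; infer_instance

-- ===== CLAIM (what is proved, stated in full; the proofs are below) =====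
def Claim_equal_extract_sld_py : Prop := ∀ (domain : String), Dom_extract_sld_py domain → Spec_extract_sld_py domain (extract_sld_py domain)

-- ===== LEMMAS AND PROOFS =====

-- PySem's splitOn agrees with Mathlib's List.splitOn for a one-character separator
lemma splitOn_go_eq (c : Char) (fuel : ℕ) (l cur : List Char) (acc : List (List Char))
    (h : l.length < fuel) :
    PySem.Chars.splitOn.go [c] fuel l cur acc
      = acc.reverse ++ (List.splitOn c l).modifyHead (cur.reverse ++ ·) := by
  induction fuel generalizing l cur acc with
  | zero => omega
  | succ fuel ih =>
    cases l with
    | nil =>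
      simp [PySem.Chars.splitOn.go, List.splitOn, List.splitOnP, List.splitOnP.go]
    | cons x rest =>
      rw [PySem.Chars.splitOn.go]
      have hrl : rest.length < fuel := by simp at h; omega
      by_cases hx : x = c
      · subst hx
        rw [if_pos (by simp [List.isPrefixOf])]
        rw [show List.drop [x].length (x :: rest) = rest from rfl]
        rw [ih _ _ _ hrl]
        have hs : List.splitOn x (x :: rest) = [] :: List.splitOn x rest := by
          simp [List.splitOn, List.splitOnP_cons]
        rw [hs]
        cases List.splitOn x rest <;> simp
      · have hpre : [c].isPrefixOf (x :: rest) = false := by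
          simp [List.isPrefixOf]; exact fun hxc => absurd hxc.symm hx
        rw [if_neg (by simp [hpre])]
        rw [ih _ _ _ hrl]
        have hs : List.splitOn c (x :: rest) = (List.splitOn c rest).modifyHead (x :: ·) := by
          simp [List.splitOn, List.splitOnP_cons, hx]
        rw [hs]
        obtain ⟨h0, t0, he⟩ := List.exists_cons_of_ne_nil (List.splitOnP_ne_nil (· == c) rest)
        rw [show List.splitOn c rest = List.splitOnP (· == c) rest from rfl, he]
        simp

lemma chars_splitOn_eq (c : Char) (cs : List Char) :
    PySem.Chars.splitOn cs [c] = List.splitOn c cs := by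
  rw [PySem.Chars.splitOn, splitOn_go_eq c (cs.length + 1) cs [] [] (by omega)]
  obtain ⟨h0, t0, he⟩ := List.exists_cons_of_ne_nil (List.splitOnP_ne_nil (· == c) cs)
  rw [show List.splitOn c cs = List.splitOnP (· == c) cs from rfl, he]
  simp

lemma not_mem_splitOn (x : Char) (cs l : List Char) (h : l ∈ List.splitOn x cs) : x ∉ l := by
  induction cs generalizing l with
  | nil =>
    simp [List.splitOn, List.splitOnP_nil] at h
    simp [h]
  | cons a rest ih =>
    rw [show List.splitOn x (a :: rest) = List.splitOnP (· == x) (a :: rest) from rfl,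
        List.splitOnP_cons] at h
    by_cases hax : a = x
    · rw [if_pos (by simp [hax])] at h
      rcases List.mem_cons.mp h with rfl | h'
      · simp
      · exact ih l h'
    · rw [if_neg (by simp [hax])] at h
      obtain ⟨h0, t0, he⟩ := List.exists_cons_of_ne_nil (List.splitOnP_ne_nil (· == x) rest)
      rw [he] at h
      simp only [List.modifyHead_cons] at h
      rcases List.mem_cons.mp h with rfl | h'
      · intro hmem
        rcases List.mem_cons.mp hmem with rfl | hmem'
        · exact hax rfl
        · exact ih h0 (by rw [show List.splitOn x rest = List.splitOnP (· == x) rest from rfl, he]; exact List.mem_cons_self ..) hmem'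
      · exact ih l (by rw [show List.splitOn x rest = List.splitOnP (· == x) rest from rfl, he]; exact List.mem_cons_of_mem _ h')

lemma splitOn_pair (a b : List Char) (ha : '.' ∉ a) (hb : '.' ∉ b) :
    List.splitOn '.' (a ++ '.' :: b) = [a, b] := by
  rw [show List.splitOn '.' (a ++ '.' :: b) = List.splitOnP (· == '.') (a ++ '.' :: b) from rfl]
  rw [List.splitOnP_first _ _ ?_ '.' (by simp) b, List.splitOnP_eq_single _ _ ?_]
  · intro y hy h
    rw [beq_iff_eq] at h; subst h; exact hb hy
  · intro y hy h
    rw [beq_iff_eq] at h; subst h; exact ha hy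

lemma intercalate_cons_ne (c : Char) (q : List Char) (rest : List (List Char)) (h : rest ≠ []) :
    [c].intercalate (q :: rest) = q ++ c :: [c].intercalate rest := by
  obtain ⟨r, rs, rfl⟩ := List.exists_cons_of_ne_nil h
  simp [List.intercalate, List.intersperse]

lemma intercalate_append_pair (c : Char) (qs : List (List Char)) (a b : List Char) (h : qs ≠ []) :
    [c].intercalate (qs ++ [a, b]) = [c].intercalate qs ++ c :: (a ++ c :: b) := by
  induction qs with
  | nil => exact absurd rfl h
  | cons q qs ih =>
    cases qs with
    | nil => simp [List.intercalate, List.intersperse]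
    | cons q' qs' =>
      rw [List.cons_append, intercalate_cons_ne c q _ (by simp),
          intercalate_cons_ne c q _ (by simp), ih (by simp)]
      simp

lemma slice_neg {α : Type} (xs : List α) (k : ℕ) (hk : 0 < k) :
    PySem.List.slice xs none (some (-(k : Int))) = xs.take (xs.length - k) := by
  simp only [PySem.List.slice, PySem.List.clampIdx]
  split_ifs with h1 h2
  · rw [show xs.length - k = 0 by omega]
    simp
  · simp only [List.drop_zero, Nat.sub_zero]
    congr 1
    omega
  · omega

lemma slice_last_two {α : Type} (xs : List α) (h : 2 ≤ xs.length) :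
    PySem.List.slice xs (some (-2)) none = xs.drop (xs.length - 2) := by
  simp only [PySem.List.slice, PySem.List.clampIdx]
  split_ifs with h1 h2
  · omega
  · rw [show ((xs.length : Int) + -2).toNat = xs.length - 2 by omega]
    exact List.take_of_length_le (by simp)
  · omega

lemma pyGet_neg {α : Type} (xs : List α) (m : ℕ) (hm : 0 < m) (hlen : m ≤ xs.length) :
    PySem.List.pyGet? xs (-(m : Int)) = xs[xs.length - m]? := by
  simp only [PySem.List.pyGet?, PySem.List.pyIdx?]
  rw [if_neg (by omega), if_pos (by omega)]
  rw [show xs.length - (- -(m:Int)).toNat = xs.length - m by omega]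
  rfl

-- the heart: A's suffix test is exactly "at least 3 labels whose last two are t1, t2"
lemma endswith_iff_key (d t1 t2 : List Char) (h1 : '.' ∉ t1) (h2 : '.' ∉ t2) :
    PySem.Chars.endswith d ('.' :: (t1 ++ '.' :: t2)) = true ↔
      3 ≤ (List.splitOn '.' d).length ∧
        (List.splitOn '.' d).drop ((List.splitOn '.' d).length - 2) = [t1, t2] := by
  rw [PySem.Chars.endswith_iff]
  constructor
  · rintro ⟨pre, rfl⟩
    have hsplit : List.splitOn '.' (pre ++ '.' :: (t1 ++ '.' :: t2))
        = List.splitOn '.' pre ++ [t1, t2] := by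
      rw [show List.splitOn '.' (pre ++ '.' :: (t1 ++ '.' :: t2))
            = List.splitOnP (· == '.') (pre ++ '.' :: (t1 ++ '.' :: t2)) from rfl,
          List.splitOnP_append_cons _ _ _ _ (by simp)]
      rw [show List.splitOnP (· == '.') (t1 ++ '.' :: t2) = List.splitOn '.' (t1 ++ '.' :: t2) from rfl,
          splitOn_pair t1 t2 h1 h2]
      rfl
    rw [hsplit]
    have hne : List.splitOn '.' pre ≠ [] := List.splitOnP_ne_nil _ _
    have hlen : 1 ≤ (List.splitOn '.' pre).length := List.length_pos_iff.mpr hne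
    refine ⟨by simp; omega, ?_⟩
    rw [show (List.splitOn '.' pre ++ [t1, t2]).length - 2 = (List.splitOn '.' pre).length by simp]
    exact List.drop_left
  · rintro ⟨h3, hdrop⟩
    have hps : List.splitOn '.' d
        = (List.splitOn '.' d).take ((List.splitOn '.' d).length - 2) ++ [t1, t2] := by
      conv_lhs => rw [← List.take_append_drop ((List.splitOn '.' d).length - 2) (List.splitOn '.' d)]
      rw [hdrop]
    have hqne : (List.splitOn '.' d).take ((List.splitOn '.' d).length - 2) ≠ [] := by
      have : ((List.splitOn '.' d).take ((List.splitOn '.' d).length - 2)).length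
          = (List.splitOn '.' d).length - 2 := by simp
      intro hnil; rw [hnil] at this; simp at this; omega
    have hd : d = ['.'].intercalate (List.splitOn '.' d) := (List.intercalate_splitOn d '.').symm
    refine ⟨['.'].intercalate ((List.splitOn '.' d).take ((List.splitOn '.' d).length - 2)), ?_⟩
    conv_rhs => rw [hd, hps]
    rw [intercalate_append_pair _ _ _ _ hqne]

-- the value A computes on a matched suffix equals B's parts[-3]
lemma valA (d t1 t2 : List Char) (h3 : 3 ≤ (List.splitOn '.' d).length)
    (hdrop : (List.splitOn '.' d).drop ((List.splitOn '.' d).length - 2) = [t1, t2]) :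
    (PySem.List.pyGet?
        (List.splitOn '.'
          (PySem.Chars.slice d none (some (-((('.' :: (t1 ++ '.' :: t2)).length : ℕ) : Int)))))
        (-1)).getD (PySem.Chars.slice d none (some (-((('.' :: (t1 ++ '.' :: t2)).length : ℕ) : Int))))
      = (PySem.List.pyGet? (List.splitOn '.' d) (-3)).getD [] := by
  set ps := List.splitOn '.' d with hpsdef
  set qs := ps.take (ps.length - 2) with hqsdef
  have hps : ps = qs ++ [t1, t2] := by
    conv_lhs => rw [← List.take_append_drop (ps.length - 2) ps]
    rw [hdrop]
  have hqlen : qs.length = ps.length - 2 := by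
    rw [hqsdef]; simp
  have hqne : qs ≠ [] := by
    intro hnil; rw [hnil] at hqlen; simp at hqlen; omega
  have hfree : ∀ l ∈ qs, '.' ∉ l := fun l hl =>
    not_mem_splitOn '.' d l (by rw [← hpsdef]; exact List.mem_of_mem_take hl)
  have hd : d = ['.'].intercalate qs ++ '.' :: (t1 ++ '.' :: t2) := by
    conv_lhs => rw [← List.intercalate_splitOn d '.', ← hpsdef, hps]
    rw [intercalate_append_pair _ _ _ _ hqne]
  have hk : 0 < ('.' :: (t1 ++ '.' :: t2)).length := by simp
  rw [PySem.Chars.slice_eq_listSlice, slice_neg _ _ hk]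
  have hdlen : d.length - ('.' :: (t1 ++ '.' :: t2)).length = (['.'].intercalate qs).length := by
    rw [hd]; simp
  rw [hdlen, hd, List.take_left' rfl]
  rw [List.splitOn_intercalate qs '.' hfree hqne]
  rw [show (-1 : Int) = -((1 : ℕ) : Int) by norm_num,
      pyGet_neg qs 1 (by omega) (by omega)]
  rw [show (-3 : Int) = -((3 : ℕ) : Int) by norm_num,
      pyGet_neg ps 3 (by omega) (by omega)]
  rw [hps]
  rw [show (qs ++ [t1, t2]).length - 3 = qs.length - 1 by simp]
  rw [List.getElem?_append_left (by omega)]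
  have hlt : qs.length - 1 < qs.length := by
    have := List.length_pos_iff.mpr hqne; omega
  rw [List.getElem?_eq_getElem hlt]
  rfl

lemma endswith_true_of_drop (d t1 t2 : List Char) (hf1 : '.' ∉ t1) (hf2 : '.' ∉ t2)
    (h3 : 3 ≤ (List.splitOn '.' d).length)
    (hd : (List.splitOn '.' d).drop ((List.splitOn '.' d).length - 2) = [t1, t2]) :
    PySem.Chars.endswith d ('.' :: (t1 ++ '.' :: t2)) = true :=
  (endswith_iff_key d t1 t2 hf1 hf2).mpr ⟨h3, hd⟩

lemma endswith_false_of_drop (d t1 t2 : List Char) (hf1 : '.' ∉ t1) (hf2 : '.' ∉ t2)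
    (hd : (List.splitOn '.' d).drop ((List.splitOn '.' d).length - 2) ≠ [t1, t2]) :
    PySem.Chars.endswith d ('.' :: (t1 ++ '.' :: t2)) = false := by
  rw [Bool.eq_false_iff]
  intro h
  exact hd ((endswith_iff_key d t1 t2 hf1 hf2).mp h).2

-- the six multi-part TLDs of A, split into their two labels
def tldPairs : List (List Char × List Char) :=
  [("co".toList, "uk".toList), ("co".toList, "jp".toList), ("com".toList, "br".toList),
   ("com".toList, "au".toList), ("org".toList, "uk".toList), ("co".toList, "in".toList)]

lemma loop_some (d : List Char) (pairs : List (List Char × List Char)) (t1 t2 : List Char)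
    (hfree : ∀ p ∈ pairs, '.' ∉ p.1 ∧ '.' ∉ p.2)
    (hmem : (t1, t2) ∈ pairs)
    (h3 : 3 ≤ (List.splitOn '.' d).length)
    (habd : (List.splitOn '.' d).drop ((List.splitOn '.' d).length - 2) = [t1, t2]) :
    extract_sld_py_loop (pairs.map (fun p => '.' :: (p.1 ++ '.' :: p.2))) d
      = some ((PySem.List.pyGet? (List.splitOn '.' d) (-3)).getD []) := by
  induction pairs with
  | nil => cases hmem
  | cons p rest ih =>
    simp only [List.map_cons, extract_sld_py_loop]
    by_cases hp : (List.splitOn '.' d).drop ((List.splitOn '.' d).length - 2) = [p.1, p.2]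
    · have he := endswith_true_of_drop d p.1 p.2 (hfree p (List.mem_cons_self ..)).1
        (hfree p (List.mem_cons_self ..)).2 h3 hp
      rw [he]
      simp only [if_true]
      rw [chars_splitOn_eq]
      exact congrArg some (valA d p.1 p.2 h3 hp)
    · have he := endswith_false_of_drop d p.1 p.2 (hfree p (List.mem_cons_self ..)).1
        (hfree p (List.mem_cons_self ..)).2 hp
      rw [he]
      simp only [Bool.false_eq_true, if_false]
      have hmem' : (t1, t2) ∈ rest := by
        rcases List.mem_cons.mp hmem with heq | h'
        · exfalso; apply hp; rw [habd, ← heq]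
        · exact h'
      exact ih (fun q hq => hfree q (List.mem_cons_of_mem _ hq)) hmem'

lemma loop_none (d : List Char) (pairs : List (List Char × List Char))
    (hfalse : ∀ p ∈ pairs, PySem.Chars.endswith d ('.' :: (p.1 ++ '.' :: p.2)) = false) :
    extract_sld_py_loop (pairs.map (fun p => '.' :: (p.1 ++ '.' :: p.2))) d = none := by
  induction pairs with
  | nil => rfl
  | cons p rest ih =>
    simp only [List.map_cons, extract_sld_py_loop]
    rw [hfalse p (List.mem_cons_self ..)]
    simp only [Bool.false_eq_true, if_false]
    exact ih (fun q hq => hfalse q (List.mem_cons_of_mem _ hq))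

lemma core_eq (d : List Char) :
    (match extract_sld_py_loop
        [".co.uk".toList, ".co.jp".toList, ".com.br".toList,
         ".com.au".toList, ".org.uk".toList, ".co.in".toList] d with
    | some r => r
    | none =>
      let parts := PySem.Chars.splitOn d ['.']
      if 2 ≤ parts.length then (PySem.List.pyGet? parts (-2)).getD []
      else (PySem.List.pyGet? parts 0).getD []) =
    (let parts := PySem.Chars.splitOn d ['.']
     if 3 ≤ parts.length ∧
        PySem.Chars.join ['.'] (PySem.List.slice parts (some (-2)) none) ∈
          PySem.Set.ofList ["co.uk".toList, "co.jp".toList, "com.br".toList,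
                            "com.au".toList, "org.uk".toList, "co.in".toList] then
      (PySem.List.pyGet? parts (-3)).getD []
     else if 2 ≤ parts.length then (PySem.List.pyGet? parts (-2)).getD []
     else (PySem.List.pyGet? parts 0).getD []) := by
  have hmts : [".co.uk".toList, ".co.jp".toList, ".com.br".toList,
               ".com.au".toList, ".org.uk".toList, ".co.in".toList]
      = tldPairs.map (fun p => '.' :: (p.1 ++ '.' :: p.2)) := by decide
  rw [hmts]
  simp only [chars_splitOn_eq]
  by_cases hB : 3 ≤ (List.splitOn '.' d).length ∧
      PySem.Chars.join ['.'] (PySem.List.slice (List.splitOn '.' d) (some (-2)) none) ∈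
        PySem.Set.ofList ["co.uk".toList, "co.jp".toList, "com.br".toList,
                          "com.au".toList, "org.uk".toList, "co.in".toList]
  · obtain ⟨h3, hmem⟩ := hB
    have hmem0 := hmem
    rw [slice_last_two _ (by omega)] at hmem
    have hdl : ((List.splitOn '.' d).drop ((List.splitOn '.' d).length - 2)).length = 2 := by
      simp; omega
    rcases hab : (List.splitOn '.' d).drop ((List.splitOn '.' d).length - 2) with
      _ | ⟨a, _ | ⟨b, _ | _⟩⟩ <;> rw [hab] at hdl <;> simp at hdl
    rw [hab] at hmem
    have ha : '.' ∉ a := not_mem_splitOn '.' d a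
      (List.mem_of_mem_drop (by rw [hab]; exact List.mem_cons_self ..))
    have hb : '.' ∉ b := not_mem_splitOn '.' d b
      (List.mem_of_mem_drop (by rw [hab]; exact List.mem_cons_of_mem _ (List.mem_cons_self ..)))
    have hjoin : PySem.Chars.join ['.'] [a, b] = a ++ '.' :: b := by
      simp [PySem.Chars.join, List.intercalate, List.intersperse]
    rw [hjoin] at hmem
    have hsp : List.splitOn '.' (a ++ '.' :: b) = [a, b] := splitOn_pair a b ha hb
    have hmem' : a ++ '.' :: b ∈
        ["co.uk".toList, "co.jp".toList, "com.br".toList,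
         "com.au".toList, "org.uk".toList, "co.in".toList] := by
      simpa [PySem.Set.mem_ofList] using hmem
    have hpair : (a, b) ∈ tldPairs := by
      simp only [List.mem_cons, List.not_mem_nil, or_false] at hmem'
      rcases hmem' with heq | heq | heq | heq | heq | heq
      · have h2 : [a, b] = ["co".toList, "uk".toList] := by rw [← hsp, heq]; decide
        simp only [List.cons.injEq, and_true] at h2
        rw [show (a, b) = ("co".toList, "uk".toList) from by rw [h2.1, h2.2]]
        decide
      · have h2 : [a, b] = ["co".toList, "jp".toList] := by rw [← hsp, heq]; decide
        simp only [List.cons.injEq, and_true] at h2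
        rw [show (a, b) = ("co".toList, "jp".toList) from by rw [h2.1, h2.2]]
        decide
      · have h2 : [a, b] = ["com".toList, "br".toList] := by rw [← hsp, heq]; decide
        simp only [List.cons.injEq, and_true] at h2
        rw [show (a, b) = ("com".toList, "br".toList) from by rw [h2.1, h2.2]]
        decide
      · have h2 : [a, b] = ["com".toList, "au".toList] := by rw [← hsp, heq]; decide
        simp only [List.cons.injEq, and_true] at h2
        rw [show (a, b) = ("com".toList, "au".toList) from by rw [h2.1, h2.2]]
        decide
      · have h2 : [a, b] = ["org".toList, "uk".toList] := by rw [← hsp, heq]; decide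
        simp only [List.cons.injEq, and_true] at h2
        rw [show (a, b) = ("org".toList, "uk".toList) from by rw [h2.1, h2.2]]
        decide
      · have h2 : [a, b] = ["co".toList, "in".toList] := by rw [← hsp, heq]; decide
        simp only [List.cons.injEq, and_true] at h2
        rw [show (a, b) = ("co".toList, "in".toList) from by rw [h2.1, h2.2]]
        decide
    have hBc : 3 ≤ (List.splitOn '.' d).length ∧
        PySem.Chars.join ['.'] (PySem.List.slice (List.splitOn '.' d) (some (-2)) none) ∈
          PySem.Set.ofList ["co.uk".toList, "co.jp".toList, "com.br".toList,
                            "com.au".toList, "org.uk".toList, "co.in".toList] := ⟨h3, hmem0⟩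
    rw [if_pos hBc]
    rw [loop_some d tldPairs a b (by decide) hpair h3 hab]
  · have hfalse : ∀ p ∈ tldPairs, PySem.Chars.endswith d ('.' :: (p.1 ++ '.' :: p.2)) = false := by
      intro p hp
      rw [Bool.eq_false_iff]
      intro he
      have hfree : '.' ∉ p.1 ∧ '.' ∉ p.2 := by fin_cases hp <;> exact ⟨by decide, by decide⟩
      obtain ⟨h3', hdp⟩ := (endswith_iff_key d p.1 p.2 hfree.1 hfree.2).mp he
      apply hB
      refine ⟨h3', ?_⟩
      rw [slice_last_two _ (by omega), hdp]
      rw [show PySem.Chars.join ['.'] [p.1, p.2] = p.1 ++ '.' :: p.2 from by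
        simp [PySem.Chars.join, List.intercalate, List.intersperse]]
      fin_cases hp <;> decide
    rw [loop_none d tldPairs hfalse]
    rw [if_neg hB]

-- ===== VERDICT (by name: the statement is the Claim_ definition above) =====
theorem extract_sld_py_spec : Claim_equal_extract_sld_py := by
  intro domain _
  unfold Spec_extract_sld_py extract_sld_py extract_sld_py_alt
  exact congrArg String.ofList (core_eq _)
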